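-- pv_equiv track=rewrite | github.com/marcus-grant/advent-of-code | 2024/09/solve.py | find_free_space
-- ===== SOURCE A (Python) =====
-- from typing import (
--     Union,
--     List,
--     Iterator,
--     Optional,
--     Tuple,
-- )  # , Tuple, Dict, Literal, NewType, Optional
--
-- def next_free(fs: List[int], i: int) -> int:
--     while i < len(fs):
--         if fs[i] == -1:
--             return i
--         i += 1
--     return -1
--
-- def find_free_space(fs: List[int], size: int) -> int:
--     i_free = next_free(fs, 0)
--     i_data = i_free + 1
--     while i_free + size >= i_data and i_free >= 0:
--         while i_data < len(fs) and fs[i_data] == -1: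
--             i_data += 1
--         if i_data - i_free >= size:
--             return i_free
--         i_free = next_free(fs, i_data)
--         i_data = i_free + 1
--     return -1
-- ===== SOURCE B (Python) =====
-- def find_free_space(fs, size):
--     if size <= 0:
--         return -1
--     count = 0
--     start = -1
--     for i, v in enumerate(fs):
--         if v == -1:
--             if count == 0:
--                 start = i
--             count += 1
--             if count >= size:
--                 return start
--         else:
--             count = 0
--     return -1
-- ===== Notes on version B (the rewrite author's own statement) =====
-- stated objective: simpler
-- what changed: Replaced the two-pointer scan (next_free helper plus a nested inner while that jumps pointer-pair by pointer-pair over runs) with one plain left-to-right pass that maintains the length and start index of the current run of -1 cells.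
import Mathlib
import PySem

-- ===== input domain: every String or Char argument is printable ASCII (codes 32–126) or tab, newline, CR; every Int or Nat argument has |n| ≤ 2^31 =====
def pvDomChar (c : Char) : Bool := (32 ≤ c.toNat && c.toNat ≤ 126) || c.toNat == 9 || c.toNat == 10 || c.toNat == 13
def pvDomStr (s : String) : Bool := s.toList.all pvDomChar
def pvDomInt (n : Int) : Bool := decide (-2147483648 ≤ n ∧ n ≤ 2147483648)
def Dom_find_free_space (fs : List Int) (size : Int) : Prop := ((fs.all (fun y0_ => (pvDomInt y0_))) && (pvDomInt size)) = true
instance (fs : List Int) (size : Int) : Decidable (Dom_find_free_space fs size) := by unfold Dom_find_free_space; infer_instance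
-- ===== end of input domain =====

-- B replaces A's two-pointer run-jumping scan (next_free helper + nested inner while) by a single
-- left-to-right pass that keeps the length and start index of the current run of -1 cells: same
-- values everywhere, a plainer decomposition (objective: simpler).

-- ===== PORT A =====
-- while i < len(fs): if fs[i] == -1: return i; i += 1; return -1
def next_free (fs : List Int) (i : Int) : Int :=
  if h : i < (fs.length : Int) then
    if PySem.List.pyGetD fs i 0 = -1 then i else next_free fs (i + 1)
  else -1
termination_by ((fs.length : Int) - i).toNat
decreasing_by omega

-- the inner 'while i_data < len(fs) and fs[i_data] == -1: i_data += 1' of A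
def skip_data (fs : List Int) (i : Int) : Int :=
  if h : i < (fs.length : Int) ∧ PySem.List.pyGetD fs i 0 = -1 then skip_data fs (i + 1)
  else i
termination_by ((fs.length : Int) - i).toNat
decreasing_by omega

-- termination facts cited by find_free_loop's decreasing_by
lemma skip_data_le (fs : List Int) (i : Int) : i ≤ skip_data fs i := by
  fun_induction skip_data fs i with
  | case1 i h ih => omega
  | case2 i h => omega

lemma next_free_lb (fs : List Int) (i : Int) :
    next_free fs i = -1 ∨ (i ≤ next_free fs i ∧ next_free fs i < (fs.length : Int)) := by
  fun_induction next_free fs i with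
  | case1 i h h2 => right; omega
  | case2 i h h2 ih =>
    rcases ih with h3 | h3
    · left; exact h3
    · right; omega
  | case3 i h => left; rfl

-- the outer while loop of A, state (i_free, i_data)
def find_free_loop (fs : List Int) (size : Int) (i_free i_data : Int) : Int :=
  if h : i_free + size ≥ i_data ∧ i_free ≥ 0 then
    let d := skip_data fs i_data
    if d - i_free ≥ size then i_free
    else
      let f := next_free fs d
      find_free_loop fs size f (f + 1)
  else -1
termination_by ((if 0 ≤ i_free then 1 else 0), ((fs.length : Int) + 1 - i_data).toNat)
decreasing_by
  rcases next_free_lb fs (skip_data fs i_data) with hnf | hnf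
  · apply Prod.Lex.left
    simp [hnf, h.2]
  · have hsd := skip_data_le fs i_data
    apply Prod.Lex.right'
    · have h2 : (0:Int) ≤ i_free := h.2
      rw [if_pos h2]
      split <;> omega
    · omega

def find_free_space (fs : List Int) (size : Int) : Int :=
  let i_free := next_free fs 0
  find_free_loop fs size i_free (i_free + 1)

-- ===== PORT B =====
-- the 'for i, v in enumerate(fs)' pass of B, carrying (i, count, start)
def scan_run (fs : List Int) (size : Int) (i count start : Int) : Int :=
  match fs with
  | [] => -1
  | v :: rest =>
    if v = -1 then
      let start' := if count = 0 then i else start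
      let count' := count + 1
      if count' ≥ size then start' else scan_run rest size (i + 1) count' start'
    else scan_run rest size (i + 1) 0 start

def find_free_space_alt (fs : List Int) (size : Int) : Int :=
  if size ≤ 0 then -1 else scan_run fs size 0 0 (-1)

-- ===== PRECONDITION & SPEC =====
def Spec_find_free_space (fs : List Int) (size : Int) (out : Int) : Prop := out = find_free_space_alt fs size
instance (fs : List Int) (size : Int) (out : Int) : Decidable (Spec_find_free_space fs size out) := by unfold Spec_find_free_space; infer_instance

-- ===== CLAIM (what is proved, stated in full; the proofs are below) =====
def Claim_equal_find_free_space : Prop := ∀ (fs : List Int) (size : Int), Dom_find_free_space fs size → Spec_find_free_space fs size (find_free_space fs size)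

-- ===== LEMMAS AND PROOFS =====

-- common reference: winFree l k ⟺ the first k cells of l exist and are all -1;
-- ffs l k = index of the first position whose k-cell window is all free, or -1.
def winFree (l : List Int) (k : Nat) : Bool := decide (k ≤ l.length) && (l.take k).all (· == -1)

def ffs (l : List Int) (k : Nat) : Int :=
  match l with
  | [] => -1
  | _ :: rest => if winFree l k then 0 else (if ffs rest k = -1 then -1 else 1 + ffs rest k)

lemma ffs_nonneg (l : List Int) (k : Nat) : ffs l k = -1 ∨ 0 ≤ ffs l k := by
  induction l with
  | nil => left; rfl
  | cons v rest ih =>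
    rw [ffs]
    split
    · right; omega
    · rcases ih with h | h
      · rw [if_pos h]; left; rfl
      · by_cases h2 : ffs rest k = -1
        · rw [if_pos h2]; left; rfl
        · rw [if_neg h2]; right; omega

lemma winFree_cons_free (l : List Int) (k : Nat) : winFree ((-1) :: l) (k + 1) = winFree l k := by
  simp [winFree]

lemma winFree_run_short {c k : Nat} (rest : List Int) (hck : c < k)
    (hrest : ∀ h0 ∈ rest.head?, h0 ≠ -1) :
    winFree (List.replicate c (-1) ++ rest) k = false := by
  induction c generalizing k with
  | zero =>
    simp only [List.replicate_zero, List.nil_append]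
    cases rest with
    | nil => simp [winFree]; omega
    | cons v l' =>
      have hv : v ≠ -1 := hrest v (by simp)
      obtain ⟨k', rfl⟩ : ∃ k', k = k' + 1 := ⟨k - 1, by omega⟩
      simp [winFree, List.take_succ_cons, hv]
  | succ c ih =>
    obtain ⟨k', rfl⟩ : ∃ k', k = k' + 1 := ⟨k - 1, by omega⟩
    rw [List.replicate_succ, List.cons_append, winFree_cons_free]
    exact ih (by omega)

lemma ffs_run_short {c k : Nat} (rest : List Int) (hck : c < k)
    (hrest : ∀ h0 ∈ rest.head?, h0 ≠ -1) :
    ffs (List.replicate c (-1) ++ rest) k =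
      (if ffs rest k = -1 then -1 else (c : Int) + ffs rest k) := by
  induction c with
  | zero => simp
  | succ c ih =>
    rw [List.replicate_succ, List.cons_append, ffs]
    rw [if_neg (by
      obtain ⟨k', rfl⟩ : ∃ k', k = k' + 1 := ⟨k - 1, by omega⟩
      rw [winFree_cons_free]
      simp [winFree_run_short (c := c) (k := k') rest (by omega) hrest])]
    rw [ih (by omega)]
    have := ffs_nonneg rest k
    split <;> split_ifs <;> push_cast <;> omega

lemma ffs_cons_nonfree {v : Int} (l : List Int) {k : Nat} (hv : v ≠ -1) (hk : 1 ≤ k) :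
    ffs (v :: l) k = (if ffs l k = -1 then -1 else 1 + ffs l k) := by
  have hw := winFree_run_short (c := 0) (k := k) (v :: l) (by omega) (by simpa using hv)
  simp only [List.replicate_zero, List.nil_append] at hw
  rw [ffs, if_neg (by simp [hw])]

lemma ffs_replicate_ge {c k : Nat} (rest : List Int) (hk : 1 ≤ k) (hkc : k ≤ c) :
    ffs (List.replicate c (-1) ++ rest) k = 0 := by
  obtain ⟨c', rfl⟩ : ∃ c', c = c' + 1 := ⟨c - 1, by omega⟩
  rw [List.replicate_succ, List.cons_append, ffs, if_pos]
  rw [← List.cons_append, ← List.replicate_succ]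
  unfold winFree
  rw [List.take_append_of_le_length (by simp; omega), List.take_replicate]
  simp only [Bool.and_eq_true, decide_eq_true_eq, List.all_eq_true]
  constructor
  · simp; omega
  · intro x hx
    rcases List.eq_of_mem_replicate hx with rfl
    simp

lemma ffs_all_nonfree {l : List Int} {k : Nat} (hl : ∀ v ∈ l, v ≠ -1) (hk : 1 ≤ k) :
    ffs l k = -1 := by
  induction l with
  | nil => rfl
  | cons v rest ih =>
    rw [ffs_cons_nonfree rest (hl v (by simp)) hk]
    rw [ih (fun v hv => hl v (by simp [hv]))]
    simp

lemma ffs_prefix_nonfree {p : List Int} (l : List Int) {k : Nat}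
    (hp : ∀ v ∈ p, v ≠ -1) (hk : 1 ≤ k) :
    ffs (p ++ l) k = (if ffs l k = -1 then -1 else (p.length : Int) + ffs l k) := by
  induction p with
  | nil => simp
  | cons v rest ih =>
    rw [List.cons_append, ffs_cons_nonfree _ (hp v (by simp)) hk]
    rw [ih (fun v hv => hp v (by simp [hv]))]
    have := ffs_nonneg l k
    simp only [List.length_cons]
    split <;> split_ifs <;> push_cast <;> omega

-- B's loop computes ffs of the list padded with the already-counted free cells
lemma scan_run_eq (size : Int) (hs : 1 ≤ size) :
    ∀ (l : List Int) (i count start : Int), 0 ≤ count → count < size →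
    (count = 0 ∨ start = i - count) →
    scan_run l size i count start =
      (if ffs (List.replicate count.toNat (-1) ++ l) size.toNat = -1 then -1
       else (i - count) + ffs (List.replicate count.toNat (-1) ++ l) size.toNat) := by
  intro l
  induction l with
  | nil =>
    intro i count start h0 h1 h2
    rw [scan_run]
    have h3 := ffs_run_short (c := count.toNat) (k := size.toNat) [] (by omega) (by simp)
    rw [h3]
    simp [ffs]
  | cons v rest ih =>
    intro i count start h0 h1 h2
    rw [scan_run]
    by_cases hv : v = -1
    · rw [if_pos hv]
      subst hv
      simp only []
      have hstart : (if count = 0 then i else start) = i - count := by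
        by_cases hc : count = 0
        · rw [if_pos hc]; omega
        · rw [if_neg hc]
          rcases h2 with h2 | h2
          · exact absurd h2 hc
          · omega
      by_cases hge : count + 1 ≥ size
      · rw [if_pos hge]
        have h4 : List.replicate count.toNat (-1) ++ (-1) :: rest
            = List.replicate (count.toNat + 1) (-1) ++ rest := by
          rw [List.replicate_succ', List.append_assoc, List.singleton_append]
        rw [h4, ffs_replicate_ge rest (by omega) (by omega), hstart]
        norm_num
      · rw [if_neg hge]
        have h5 := ih (i + 1) (count + 1) (if count = 0 then i else start) (by omega) (by omega)
          (Or.inr (by rw [hstart]; ring))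
        rw [h5]
        have h4 : List.replicate (count + 1).toNat (-1) ++ rest
            = List.replicate count.toNat (-1) ++ (-1) :: rest := by
          have : (count + 1).toNat = count.toNat + 1 := by omega
          rw [this, List.replicate_succ', List.append_assoc, List.singleton_append]
        rw [h4]
        have h6 : i + 1 - (count + 1) = i - count := by ring
        rw [h6]
    · rw [if_neg hv]
      have h5 := ih (i + 1) 0 start (by omega) (by omega) (Or.inl rfl)
      rw [h5]
      simp only [Int.toNat_zero, List.replicate_zero, List.nil_append]
      have h7 := ffs_run_short (c := count.toNat) (k := size.toNat) (v :: rest) (by omega)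
        (by simpa using hv)
      rw [h7, ffs_cons_nonfree rest hv (by omega)]
      have h8 := ffs_nonneg rest size.toNat
      have h9 : (count.toNat : Int) = count := Int.toNat_of_nonneg h0
      split_ifs <;> omega

lemma skip_data_spec_gas (fs : List Int) (gas : Nat) :
    ∀ n : Nat, fs.length - n ≤ gas → ∃ t : Nat, skip_data fs (n : Int) = ((n + t : Nat) : Int) ∧
      (fs.drop n).take t = List.replicate t (-1) ∧
      (∀ h0 ∈ (fs.drop (n + t)).head?, h0 ≠ -1) := by
  induction gas with
  | zero =>
    intro n hn
    refine ⟨0, ?_, by simp, ?_⟩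
    · rw [skip_data, dif_neg (by push_cast; omega)]
      simp
    · intro h0 hh0
      rw [Nat.add_zero, List.head?_drop, List.getElem?_eq_none (by omega : fs.length ≤ n)] at hh0
      simp at hh0
  | succ gas ih =>
    intro n hn
    by_cases hlt : n < fs.length
    · have hget : PySem.List.pyGetD fs (n : Int) 0 = fs[n] := by
        rw [PySem.List.pyGetD_natCast, List.getD_eq_getElem _ _ hlt]
      by_cases hfree : fs[n] = -1
      · rw [skip_data, dif_pos (by rw [hget]; exact ⟨by push_cast; omega, hfree⟩)]
        have hc : ((n : Int) + 1) = ((n + 1 : Nat) : Int) := by push_cast; ring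
        rw [hc]
        rcases ih (n + 1) (by omega) with ⟨t, h1, h2, h3⟩
        refine ⟨t + 1, ?_, ?_, ?_⟩
        · rw [h1]; push_cast; ring
        · rw [List.drop_eq_getElem_cons hlt, List.take_succ_cons, hfree, h2,
            List.replicate_succ]
        · have : n + (t + 1) = (n + 1) + t := by omega
          rw [this]; exact h3
      · refine ⟨0, ?_, by simp, ?_⟩
        · rw [skip_data, dif_neg (by rw [hget]; tauto)]
          simp
        · intro h0 hh0
          rw [Nat.add_zero, List.head?_drop, List.getElem?_eq_getElem hlt] at hh0
          simp at hh0
          subst hh0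
          exact hfree
    · refine ⟨0, ?_, by simp, ?_⟩
      · rw [skip_data, dif_neg (by push_cast; omega)]
        simp
      · intro h0 hh0
        rw [Nat.add_zero, List.head?_drop, List.getElem?_eq_none (by omega : fs.length ≤ n)] at hh0
        simp at hh0

lemma skip_data_spec (fs : List Int) (n : Nat) :
    ∃ t : Nat, skip_data fs (n : Int) = ((n + t : Nat) : Int) ∧
      (fs.drop n).take t = List.replicate t (-1) ∧
      (∀ h0 ∈ (fs.drop (n + t)).head?, h0 ≠ -1) :=
  skip_data_spec_gas fs fs.length n (by omega)

lemma next_free_cases_gas (fs : List Int) (gas : Nat) :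
    ∀ n : Nat, fs.length - n ≤ gas →
    (next_free fs (n : Int) = -1 ∧ ∀ v ∈ fs.drop n, v ≠ -1) ∨
    (∃ m : Nat, next_free fs (n : Int) = (m : Int) ∧ n ≤ m ∧ m < fs.length ∧
      (fs.drop m).head? = some (-1) ∧ (∀ v ∈ (fs.drop n).take (m - n), v ≠ -1)) := by
  induction gas with
  | zero =>
    intro n hn
    left
    constructor
    · rw [next_free, dif_neg (by push_cast; omega)]
    · have hnil : fs.drop n = [] := List.drop_eq_nil_of_le (by omega)
      simp [hnil]
  | succ gas ih =>
    intro n hn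
    by_cases hlt : n < fs.length
    · have hget : PySem.List.pyGetD fs (n : Int) 0 = fs[n] := by
        rw [PySem.List.pyGetD_natCast, List.getD_eq_getElem _ _ hlt]
      by_cases hfree : fs[n] = -1
      · right
        refine ⟨n, ?_, le_refl n, hlt, ?_, by simp⟩
        · rw [next_free, dif_pos (by push_cast; omega), if_pos (by rw [hget]; exact hfree)]
        · rw [List.head?_drop, List.getElem?_eq_getElem hlt, hfree]
      · rw [next_free, dif_pos (by push_cast; omega), if_neg (by rw [hget]; exact hfree)]
        have hc : ((n : Int) + 1) = ((n + 1 : Nat) : Int) := by push_cast; ring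
        rw [hc]
        rcases ih (n + 1) (by omega) with ⟨h1, h2⟩ | ⟨m, hm1, hm2, hm3, hm4, hm5⟩
        · left
          refine ⟨h1, ?_⟩
          intro v hv
          rw [List.drop_eq_getElem_cons hlt] at hv
          rcases List.mem_cons.1 hv with rfl | hv
          · exact hfree
          · exact h2 v hv
        · right
          refine ⟨m, hm1, by omega, hm3, hm4, ?_⟩
          intro v hv
          rw [List.drop_eq_getElem_cons hlt] at hv
          have hmn : m - n = (m - (n + 1)) + 1 := by omega
          rw [hmn, List.take_succ_cons] at hv
          rcases List.mem_cons.1 hv with rfl | hv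
          · exact hfree
          · exact hm5 v hv
    · left
      constructor
      · rw [next_free, dif_neg (by push_cast; omega)]
      · have hnil : fs.drop n = [] := List.drop_eq_nil_of_le (by omega)
        simp [hnil]

lemma next_free_cases (fs : List Int) (n : Nat) :
    (next_free fs (n : Int) = -1 ∧ ∀ v ∈ fs.drop n, v ≠ -1) ∨
    (∃ m : Nat, next_free fs (n : Int) = (m : Int) ∧ n ≤ m ∧ m < fs.length ∧
      (fs.drop m).head? = some (-1) ∧ (∀ v ∈ (fs.drop n).take (m - n), v ≠ -1)) :=
  next_free_cases_gas fs fs.length n (by omega)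

-- A's outer loop, restarted at scan position n, computes ffs of (fs.drop n)
lemma loopA_eq_gas (fs : List Int) (size : Int) (hs : 1 ≤ size) (gas : Nat) :
    ∀ n : Nat, n ≤ fs.length → fs.length - n ≤ gas →
    find_free_loop fs size (next_free fs (n : Int)) (next_free fs (n : Int) + 1) =
      (if ffs (fs.drop n) size.toNat = -1 then -1 else (n : Int) + ffs (fs.drop n) size.toNat) := by
  have hk1 : 1 ≤ size.toNat := by omega
  induction gas with
  | zero =>
    intro n hn hgas
    rcases next_free_cases fs n with ⟨hnf, hall⟩ | ⟨m, _, hm2, hm3, _, _⟩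
    · rw [hnf, find_free_loop, dif_neg (by omega), ffs_all_nonfree hall hk1]
      simp
    · omega
  | succ gas ih =>
    intro n hn hgas
    rcases next_free_cases fs n with ⟨hnf, hall⟩ | ⟨m, hm1, hm2, hm3, hm4, hm5⟩
    · rw [hnf, find_free_loop, dif_neg (by omega), ffs_all_nonfree hall hk1]
      simp
    · rw [hm1, find_free_loop, dif_pos (by constructor <;> omega)]
      simp only []
      have hc : ((m : Int) + 1) = ((m + 1 : Nat) : Int) := by push_cast; ring
      rw [hc]
      obtain ⟨t, ht1, ht2, ht3⟩ := skip_data_spec fs (m + 1)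
      rw [ht1]
      have htb : m + 1 + t ≤ fs.length := by
        have := congrArg List.length ht2
        simp only [List.length_take, List.length_drop, List.length_replicate] at this
        omega
      have hfm : fs[m] = -1 := by
        have h := hm4
        rw [List.head?_drop, List.getElem?_eq_getElem hm3] at h
        simpa using h
      have hdm : fs.drop m = List.replicate (t + 1) (-1) ++ fs.drop (m + 1 + t) := by
        rw [List.drop_eq_getElem_cons hm3, hfm]
        conv_lhs => rw [← List.take_append_drop t (fs.drop (m + 1))]
        rw [ht2, List.drop_drop, List.replicate_succ, List.cons_append]
      have hplen : ((fs.drop n).take (m - n)).length = m - n := by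
        simp only [List.length_take, List.length_drop]
        omega
      have hdn : ffs (fs.drop n) size.toNat =
          (if ffs (fs.drop m) size.toNat = -1 then -1
           else ((m - n : Nat) : Int) + ffs (fs.drop m) size.toNat) := by
        conv_lhs => rw [← List.take_append_drop (m - n) (fs.drop n), List.drop_drop,
          show n + (m - n) = m by omega]
        rw [ffs_prefix_nonfree _ hm5 hk1, hplen]
      by_cases hbig : ((m + 1 + t : Nat) : Int) - (m : Int) ≥ size
      · rw [if_pos hbig]
        rw [hdm] at hdn
        rw [ffs_replicate_ge _ hk1 (by omega)] at hdn
        rw [hdn]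
        norm_num
        omega
      · rw [if_neg hbig]
        have hc2 := ih (m + 1 + t) (by omega) (by omega)
        rw [hc2]
        rw [hdm, ffs_run_short (c := t + 1) (fs.drop (m + 1 + t)) (by omega) ht3] at hdn
        rw [hdn]
        rcases ffs_nonneg (fs.drop (m + 1 + t)) size.toNat with hr | hr <;>
          split_ifs <;> omega

lemma loopA_eq (fs : List Int) (size : Int) (hs : 1 ≤ size) :
    ∀ n : Nat, n ≤ fs.length →
    find_free_loop fs size (next_free fs (n : Int)) (next_free fs (n : Int) + 1) =
      (if ffs (fs.drop n) size.toNat = -1 then -1 else (n : Int) + ffs (fs.drop n) size.toNat) :=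
  fun n hn => loopA_eq_gas fs size hs fs.length n hn (by omega)

-- ===== VERDICT (by name: the statement is the Claim_ definition above) =====
theorem find_free_space_spec : Claim_equal_find_free_space := by
  intro fs size _hdom
  unfold Spec_find_free_space find_free_space find_free_space_alt
  by_cases hs : size ≤ 0
  · rw [if_pos hs, find_free_loop]
    rw [dif_neg (by omega)]
  · rw [if_neg hs]
    have h1 : (1:Int) ≤ size := by omega
    have hA := loopA_eq fs size h1 0 (by omega)
    have hB := scan_run_eq size h1 fs 0 0 (-1) (by omega) (by omega) (Or.inl rfl)
    simp only [Nat.cast_zero, List.drop_zero, Int.toNat_zero, List.replicate_zero,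
      List.nil_append, zero_add, sub_zero] at hA hB
    rw [hA, hB]
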